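-- pv_equiv track=rewrite | github.com/jtapolcai/corePaperList | create_author_order.py | compute_author_order_positions
-- ===== SOURCE A (Python) =====
-- from typing import List, Dict, Callable, Tuple, Optional
--
-- def compute_author_order_positions(values: List[int]) -> List[int]:
--     """Given a list of numeric values, return 1-based standard rank author order positions.
--     Example: [10, 8, 8, 8, 5] -> [1, 2, 2, 2, 5]
--     Equal values get the same rank, but the next rank accounts for the number of tied items.
--     This determines the display order in the Google Sheet.
--     """
--     # Create list of (value, original_index) pairs
--     indexed_values = [(v, i) for i, v in enumerate(values)]
--     # Sort by value descending
--     indexed_values.sort(key=lambda x: x[0], reverse=True)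
--
--     # Assign ranks using standard ranking (1,2,2,2,5)
--     ranks = [0] * len(values)
--     current_rank = 1
--     for i, (val, orig_idx) in enumerate(indexed_values):
--         if i > 0 and indexed_values[i-1][0] != val:
--             # Different value from previous, update rank to current position + 1
--             current_rank = i + 1
--         ranks[orig_idx] = current_rank
--
--     return ranks
-- ===== SOURCE B (Python) =====
-- def compute_author_order_positions(values):
--     """Standard competition ranks (descending): rank of v = 1 + #(strictly greater)."""
--     return [1 + sum(1 for w in values if w > v) for v in values]
-- ===== Notes on version B (the rewrite author's own statement) =====
-- stated objective: simpler
-- what changed: Replaces the sort + sequential rank-assignment + scatter-write into a preallocated list by the direct definition of standard competition rank: each position's rank is 1 plus the number of strictly greater values, computed in one comprehension with no sorting or mutation.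
import Mathlib
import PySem

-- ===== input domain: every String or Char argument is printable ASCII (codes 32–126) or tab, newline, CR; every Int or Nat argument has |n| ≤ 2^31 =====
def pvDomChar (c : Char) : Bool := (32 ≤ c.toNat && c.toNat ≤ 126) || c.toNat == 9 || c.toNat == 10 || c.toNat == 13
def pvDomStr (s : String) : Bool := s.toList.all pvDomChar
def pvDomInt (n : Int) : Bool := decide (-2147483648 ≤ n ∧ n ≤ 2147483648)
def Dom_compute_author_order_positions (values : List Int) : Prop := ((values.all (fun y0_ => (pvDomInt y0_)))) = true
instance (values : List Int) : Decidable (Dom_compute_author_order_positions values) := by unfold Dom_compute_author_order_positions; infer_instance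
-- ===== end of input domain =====

-- B replaces sort + sequential rank assignment + scatter-write by the direct definition
-- of standard competition rank (1 + number of strictly greater values); objective: simpler.

-- ===== PORT A =====
-- indexed_values = [(v, i) for i, v in enumerate(values)]
def pvIndexed (values : List Int) : List (Int × Int) :=
  (PySem.List.enumerate values).map (fun p => (p.2, p.1))

-- indexed_values.sort(key=lambda x: x[0], reverse=True)
def pvSortedIdx (values : List Int) : List (Int × Int) :=
  PySem.List.sorted (pvIndexed values) (fun x => x.1) true

-- one iteration of the loop body; state = (ranks, current_rank), p = (i, (val, orig_idx))
def pvStep (s : List (Int × Int)) (st : List Int × Int) (p : Int × (Int × Int)) : List Int × Int :=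
  let cr := if 0 < p.1 ∧ (PySem.List.pyGet? s (p.1 - 1)).map Prod.fst ≠ some p.2.1
            then p.1 + 1 else st.2
  (PySem.List.pySetD st.1 p.2.2 cr, cr)   -- ranks[orig_idx] = current_rank (index always in range)

def compute_author_order_positions (values : List Int) : List Int :=
  ((PySem.List.enumerate (pvSortedIdx values)).foldl (pvStep (pvSortedIdx values))
    (List.replicate values.length 0, 1)).1

-- ===== PORT B =====
-- return [1 + sum(1 for w in values if w > v) for v in values]
def compute_author_order_positions_alt (values : List Int) : List Int :=
  values.map (fun v => 1 + (((values.filter (fun w => decide (v < w))).length : Int)))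

-- ===== PRECONDITION & SPEC =====
def Spec_compute_author_order_positions (values : List Int) (out : List Int) : Prop := out = compute_author_order_positions_alt values
instance (values : List Int) (out : List Int) : Decidable (Spec_compute_author_order_positions values out) := by unfold Spec_compute_author_order_positions; infer_instance

-- ===== CLAIM (what is proved, stated in full; the proofs are below) =====
def Claim_equal_compute_author_order_positions : Prop := ∀ (values : List Int), Dom_compute_author_order_positions values → Spec_compute_author_order_positions values (compute_author_order_positions values)

-- ===== LEMMAS AND PROOFS =====

-- number of values strictly greater than v
def pvCnt (values : List Int) (v : Int) : Nat :=
  (values.filter (fun w => decide (v < w))).length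

theorem pv_shape (values : List Int) {p : Int × Int} (hp : p ∈ pvSortedIdx values) :
    ∃ j : Nat, ∃ hj : j < values.length, p.1 = values[j] ∧ p.2 = (j : Int) := by
  rw [pvSortedIdx, PySem.List.mem_sorted] at hp
  simp only [pvIndexed, List.mem_map] at hp
  obtain ⟨q, hq, rfl⟩ := hp
  rw [PySem.List.mem_enumerate_iff] at hq
  obtain ⟨k, hk, rfl⟩ := hq
  exact ⟨k, hk, rfl, by simp⟩

theorem pv_enum_filter_len (v : Int) : ∀ (l : List Int) (st : Int),
    ((PySem.List.enumerate l st).filter (fun q => decide (v < q.2))).length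
      = (l.filter (fun w => decide (v < w))).length := by
  intro l
  induction l with
  | nil => intro st; simp [PySem.List.enumerate_nil]
  | cons x xs ih =>
    intro st
    rw [PySem.List.enumerate_cons]
    by_cases h : v < x <;> simp [h, ih]

theorem pv_cnt_transfer (values : List Int) (v : Int) :
    ((pvSortedIdx values).filter (fun p => decide (v < p.1))).length = pvCnt values v := by
  have hperm := PySem.List.sorted_perm (pvIndexed values) (fun x => x.1) true
  rw [pvSortedIdx, (hperm.filter _).length_eq, pvIndexed, List.filter_map, List.length_map]
  simpa [Function.comp] using pv_enum_filter_len v values 0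

theorem pv_mono (values : List Int) {k m : Nat} (hk : k < m) (hm : m < (pvSortedIdx values).length) :
    ((pvSortedIdx values)[m]'hm).1 ≤ ((pvSortedIdx values)[k]'(by omega)).1 := by
  have hp : (pvSortedIdx values).Pairwise (fun a b => b.1 ≤ a.1) :=
    PySem.List.sorted_pairwise_rev _ _
  rw [List.pairwise_iff_getElem] at hp
  exact hp k m (by omega) hm hk

theorem pv_cnt_zero (values : List Int) (h0 : 0 < (pvSortedIdx values).length) :
    pvCnt values (((pvSortedIdx values)[0]'h0).1) = 0 := by
  rw [← pv_cnt_transfer, List.length_eq_zero_iff, List.filter_eq_nil_iff]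
  intro p hp
  obtain ⟨m, hm, rfl⟩ := List.mem_iff_getElem.mp hp
  rcases Nat.eq_zero_or_pos m with h | h
  · subst h; simp
  · simpa using not_lt.mpr (pv_mono values h hm)

theorem pv_cnt_pos (values : List Int) {k : Nat} (hk : k < (pvSortedIdx values).length)
    (hk0 : 0 < k)
    (hne : (((pvSortedIdx values)[k-1]'(by omega)).1) ≠ (((pvSortedIdx values)[k]'hk).1)) :
    pvCnt values (((pvSortedIdx values)[k]'hk).1) = k := by
  rw [← pv_cnt_transfer]
  set w := ((pvSortedIdx values)[k]'hk).1 with hw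
  have hstrict : ∀ m (hm : m < k), w < ((pvSortedIdx values)[m]'(by omega)).1 := by
    intro m hm
    have h1 : ((pvSortedIdx values)[k]'hk).1 ≤ ((pvSortedIdx values)[k-1]'(by omega)).1 :=
      pv_mono values (by omega) hk
    have h2 : ((pvSortedIdx values)[k-1]'(by omega)).1 ≤ ((pvSortedIdx values)[m]'(by omega)).1 := by
      rcases Nat.lt_or_ge m (k-1) with h | h
      · exact pv_mono values h (by omega)
      · have : m = k - 1 := by omega
        subst this; rfl
    omega
  have hsplit : pvSortedIdx values = (pvSortedIdx values).take k ++ (pvSortedIdx values).drop k :=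
    (List.take_append_drop k _).symm
  conv_lhs => rw [hsplit]
  rw [List.filter_append, List.length_append]
  have h1 : ((pvSortedIdx values).take k).filter (fun p => decide (w < p.1))
      = (pvSortedIdx values).take k := by
    rw [List.filter_eq_self]
    intro p hp
    obtain ⟨m, hm, rfl⟩ := List.mem_iff_getElem.mp hp
    have hmk : m < k := by simpa using (List.length_take_le k (pvSortedIdx values)) |>.trans_lt' hm
    rw [List.getElem_take]
    simpa using hstrict m hmk
  have h2 : ((pvSortedIdx values).drop k).filter (fun p => decide (w < p.1)) = [] := by
    rw [List.filter_eq_nil_iff]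
    intro p hp
    obtain ⟨m, hm, rfl⟩ := List.mem_iff_getElem.mp hp
    rw [List.getElem_drop]
    rcases Nat.eq_zero_or_pos m with h | h
    · subst h; simp [hw]
    · have hlt : k + m < (pvSortedIdx values).length := by
        have := hm; simp [List.length_drop] at this; omega
      have := pv_mono values (show k < k + m by omega) hlt
      rw [hw]; simpa using not_lt.mpr this
  rw [h1, h2]
  simp [List.length_take, Nat.min_eq_left (le_of_lt hk)]

theorem pv_loop (values : List Int) : ∀ (fuel k : Nat) (ranks : List Int) (cr : Int)
    (_ : fuel = (pvSortedIdx values).length - k) (hkle : k ≤ (pvSortedIdx values).length)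
    (_ : ranks.length = values.length)
    (_ : k = 0 → cr = 1)
    (_ : ∀ _ : k ≠ 0, ∀ hkm : k - 1 < (pvSortedIdx values).length,
        cr = 1 + (pvCnt values (((pvSortedIdx values)[k-1]'hkm).1) : Int))
    (_ : ∀ m (hm : m < (pvSortedIdx values).length), m < k →
        ranks[(((pvSortedIdx values)[m]'hm).2).toNat]?
          = some (1 + (pvCnt values (((pvSortedIdx values)[m]'hm).1) : Int))),
    (((PySem.List.enumerate ((pvSortedIdx values).drop k) k).foldl (pvStep (pvSortedIdx values))
        (ranks, cr)).1.length = values.length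
     ∧ ∀ m (hm : m < (pvSortedIdx values).length),
        ((PySem.List.enumerate ((pvSortedIdx values).drop k) k).foldl (pvStep (pvSortedIdx values))
          (ranks, cr)).1[(((pvSortedIdx values)[m]'hm).2).toNat]?
          = some (1 + (pvCnt values (((pvSortedIdx values)[m]'hm).1) : Int))) := by
  intro fuel
  induction fuel with
  | zero =>
    intro k ranks cr hfuel hkle hrl hcr0 hcr hr
    have hk : k = (pvSortedIdx values).length := by omega
    rw [hk, List.drop_length, PySem.List.enumerate_nil, List.foldl_nil]
    exact ⟨hrl, fun m hm => hr m hm (by omega)⟩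
  | succ f ih =>
    intro k ranks cr hfuel hkle hrl hcr0 hcr hr
    have hklt : k < (pvSortedIdx values).length := by omega
    have hdrop : (pvSortedIdx values).drop k
        = ((pvSortedIdx values)[k]'hklt) :: (pvSortedIdx values).drop (k+1) :=
      List.drop_eq_getElem_cons hklt
    rw [hdrop, PySem.List.enumerate_cons, List.foldl_cons]
    -- the rank written at step k is 1 + #{w ∈ values | w > s[k].1}
    have hcrk : pvStep (pvSortedIdx values) (ranks, cr) ((k : Int), (pvSortedIdx values)[k]'hklt)
        = (PySem.List.pySetD ranks (((pvSortedIdx values)[k]'hklt).2)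
             (1 + (pvCnt values (((pvSortedIdx values)[k]'hklt).1) : Int)),
           1 + (pvCnt values (((pvSortedIdx values)[k]'hklt).1) : Int)) := by
      rcases Nat.eq_zero_or_pos k with hk0 | hk0
      · subst hk0
        simp only [pvStep]
        rw [if_neg (by simp)]
        rw [hcr0 rfl, pv_cnt_zero values hklt]
        simp
      · have hget : PySem.List.pyGet? (pvSortedIdx values) ((k : Int) - 1)
            = some ((pvSortedIdx values)[k-1]'(by omega)) := by
          have : ((k : Int) - 1) = ((k - 1 : Nat) : Int) := by omega
          rw [this, PySem.List.pyGet?_natCast, List.getElem?_eq_getElem (by omega)]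
        simp only [pvStep, hget]
        by_cases hne : (((pvSortedIdx values)[k-1]'(by omega)).1) = (((pvSortedIdx values)[k]'hklt).1)
        · rw [if_neg (by simp [hne])]
          rw [hcr (by omega) (by omega), hne]
        · rw [if_pos ⟨by exact_mod_cast hk0, by simp [hne]⟩]
          rw [pv_cnt_pos values hklt hk0 hne,
            show (1 : Int) + (k : Int) = (k : Int) + 1 from by ring]
    rw [hcrk]
    -- the written index is in range and names the value at that original position
    obtain ⟨j, hj, hv1, hv2⟩ := pv_shape values (List.getElem_mem hklt)
    have hset : PySem.List.pySetD ranks (((pvSortedIdx values)[k]'hklt).2)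
          (1 + (pvCnt values (((pvSortedIdx values)[k]'hklt).1) : Int))
        = ranks.set j (1 + (pvCnt values (((pvSortedIdx values)[k]'hklt).1) : Int)) := by
      rw [hv2, PySem.List.pySetD_natCast]
    rw [hset]
    have hcast : ((k : Int) + 1) = ((k + 1 : Nat) : Int) := by push_cast; ring
    rw [hcast]
    refine ih (k+1) _ _ (by omega) (by omega) (by simp [hrl]) (by omega) ?_ ?_
    · intro _ hkm
      simp only [Nat.add_sub_cancel]
    · intro m hm hmk1
      rcases Nat.lt_or_ge m k with hmk | hmk
      · -- already-written positions keep their (identical) value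
        rw [List.getElem?_set]
        by_cases hij : j = (((pvSortedIdx values)[m]'hm).2).toNat
        · obtain ⟨j', hj', hw1, hw2⟩ := pv_shape values (List.getElem_mem hm)
          have : j' = j := by rw [hw2] at hij; simpa using hij.symm
          subst this
          rw [if_pos (by omega), if_pos (by omega), hw1, hv1]
        · rw [if_neg (by omega)]
          exact hr m hm hmk
      · have : m = k := by omega
        subst this
        rw [hv2]
        simp only [Int.toNat_natCast]
        rw [List.getElem?_set_self (by omega)]


-- ===== VERDICT (by name: the statement is the Claim_ definition above) =====
theorem pv_surj (values : List Int) {j : Nat} (hj : j < values.length) :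
    ∃ m, ∃ hm : m < (pvSortedIdx values).length, ((pvSortedIdx values)[m]'hm).2 = (j : Int) := by
  have hperm : ((pvSortedIdx values).map (fun p => p.2)).Perm ((pvIndexed values).map (fun p => p.2)) :=
    (PySem.List.sorted_perm (pvIndexed values) (fun x => x.1) true).map _
  have hmem : (j : Int) ∈ (pvSortedIdx values).map (fun p => p.2) := by
    rw [hperm.mem_iff]
    have h1 : (pvIndexed values).map (fun p => p.2)
        = (PySem.List.enumerate values).map (fun p => p.1) := by
      simp [pvIndexed, List.map_map, Function.comp]
    rw [h1, PySem.List.map_fst_enumerate, PySem.List.mem_pyRange_one]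
    omega
  rw [List.mem_map] at hmem
  obtain ⟨p, hp, hpj⟩ := hmem
  obtain ⟨m, hm, rfl⟩ := List.mem_iff_getElem.mp hp
  exact ⟨m, hm, hpj⟩

-- ===== VERDICT (by name: the statement is the Claim_ definition above) =====
theorem compute_author_order_positions_spec : Claim_equal_compute_author_order_positions := by
  unfold Claim_equal_compute_author_order_positions
  intro values _
  unfold Spec_compute_author_order_positions
  obtain ⟨hreslen, hres⟩ := pv_loop values (pvSortedIdx values).length 0
    (List.replicate values.length 0) 1 (by omega) (by omega) (by simp)
    (fun _ => rfl) (by omega) (by omega)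
  rw [List.drop_zero] at hreslen hres
  have hA : compute_author_order_positions values
      = ((PySem.List.enumerate (pvSortedIdx values) ((0 : Nat) : Int)).foldl
          (pvStep (pvSortedIdx values)) (List.replicate values.length 0, 1)).1 := by
    simp [compute_author_order_positions]
  rw [hA]
  apply List.ext_getElem?
  intro j
  by_cases hj : j < values.length
  · obtain ⟨m, hm, hm2⟩ := pv_surj values hj
    have := hres m hm
    rw [hm2] at this
    simp only [Int.toNat_natCast] at this
    rw [this]
    obtain ⟨j', hj', hw1, hw2⟩ := pv_shape values (List.getElem_mem hm)
    have hjj : j' = j := by rw [hw2] at hm2; exact_mod_cast hm2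
    subst hjj
    rw [hw1]
    rw [compute_author_order_positions_alt, List.getElem?_map,
      List.getElem?_eq_getElem hj]
    simp [pvCnt]
  · rw [List.getElem?_eq_none (by omega), List.getElem?_eq_none (by simp [compute_author_order_positions_alt]; omega)]
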